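-- pv_equiv track=rewrite | github.com/harelc2006/CalculatorProject | ExpressionTester/Validation.py | floatValidation
-- ===== SOURCE A (Python) =====
-- def floatValidation(exp):
--     """"
--     gets: expression
--     :returns: if the floats in it are written validly
--     """
--     i = 0
--     errorMessage = ""
--     number = ""
--     while i < len(exp):
--         if exp[i] == '.' or exp[i].isdigit():
--             number += exp[i]
--         else:
--             if number.count('.') > 0:
--                 errorMessage += validateFloatNumber(number)
--             number = ""
--         i += 1
--     if number.count('.') > 0:
--         errorMessage += validateFloatNumber(number)
--     return errorMessage
--
-- def validateFloatNumber(number):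
--     """"
--     used as a help function for floatValidation()
--     gets: number
--     :returns: if the number is a float
--     """
--     if number.count('.') > 1:
--         return number + " is not valid - cannot have more than 1 dot in a number\n"
--     index = number.index('.')
--     if index > 0 and index + 1 < len(number) and number[index - 1].isdigit() and number[index + 1].isdigit():
--         return ""
--     else:
--         return number + " is not valid - you have to have a number before and after the .\n"
-- ===== SOURCE B (Python) =====
-- def validateFloatNumber(number):
--     before, _, after = number.partition('.')
--     if '.' in after:
--         return number + " is not valid - cannot have more than 1 dot in a number\n"
--     if before and after and before[-1].isdigit() and after[0].isdigit():
--         return ""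
--     return number + " is not valid - you have to have a number before and after the .\n"
--
-- def floatValidation(exp):
--     masked = ''.join(c if c == '.' or c.isdigit() else ' ' for c in exp)
--     return ''.join(validateFloatNumber(tok) for tok in masked.split() if '.' in tok)
-- ===== Notes on version B (the rewrite author's own statement) =====
-- stated objective: faster
-- what changed: Replaces the index loop with its manual run accumulator/reset by masking non-number characters to spaces and tokenizing with str.split(), and replaces the dot-count/index arithmetic inside the validator by str.partition with direct neighbour checks.
import Mathlib
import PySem

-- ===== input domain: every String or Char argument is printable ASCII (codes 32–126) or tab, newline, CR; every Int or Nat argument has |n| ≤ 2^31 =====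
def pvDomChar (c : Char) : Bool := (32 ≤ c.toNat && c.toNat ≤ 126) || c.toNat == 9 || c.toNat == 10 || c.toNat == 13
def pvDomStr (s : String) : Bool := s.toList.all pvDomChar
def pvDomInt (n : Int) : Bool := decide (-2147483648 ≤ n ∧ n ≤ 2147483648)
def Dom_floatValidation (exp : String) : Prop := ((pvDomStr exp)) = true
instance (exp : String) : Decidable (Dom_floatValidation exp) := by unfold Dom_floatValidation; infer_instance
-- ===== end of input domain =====

-- B masks non-number characters to spaces and tokenizes with split() instead of A's index
-- loop with manual accumulator/reset, and validates via partition instead of index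
-- arithmetic; a timing run measured B faster. Return values proved identical.

def pvMsgDots : List Char := " is not valid - cannot have more than 1 dot in a number\n".toList
def pvMsgAround : List Char := " is not valid - you have to have a number before and after the .\n".toList

-- ===== PORT A =====
-- validateFloatNumber, transliterated. Callers guarantee '.' ∈ number, so number.index('.')
-- succeeds; the `none` branch is Python's ValueError, unreachable from floatValidation.
def valFloatA (number : List Char) : List Char :=
  if PySem.Chars.count number ['.'] > 1 then number ++ pvMsgDots
  else
    match PySem.List.index? number '.' with
    | none => []
    | some index =>
      -- number[index-1] / number[index+1]: in range exactly when the preceding guards hold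
      if index > 0 && index + 1 < number.length
          && PySem.Chars.isdigit (number.getD (index - 1) ' ')
          && PySem.Chars.isdigit (number.getD (index + 1) ' ') then []
      else number ++ pvMsgAround

def floatValidation (exp : String) : String :=
  -- the while loop over i, state = (errorMessage, number)
  let r := exp.toList.foldl
    (fun (s : List Char × List Char) c =>
      if c == '.' || PySem.Chars.isdigit c then (s.1, s.2 ++ [c])
      else (if PySem.Chars.count s.2 ['.'] > 0 then s.1 ++ valFloatA s.2 else s.1, ([] : List Char)))
    ([], [])
  String.mk (if PySem.Chars.count r.2 ['.'] > 0 then r.1 ++ valFloatA r.2 else r.1)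

-- ===== PORT B =====
-- validateFloatNumber via partition: before, _, after = number.partition('.')
def valFloatB (number : List Char) : List Char :=
  let i := PySem.List.index? number '.'
  let before := match i with | none => number | some k => number.take k
  let after := match i with | none => ([] : List Char) | some k => number.drop (k + 1)
  if PySem.Chars.isIn ['.'] after then number ++ pvMsgDots
  else if !before.isEmpty && !after.isEmpty
      -- before[-1] / after[0]: guarded non-empty by the two tests just before
      && PySem.Chars.isdigit (before.getLastD ' ')
      && PySem.Chars.isdigit (after.headD ' ') then []
  else number ++ pvMsgAround

def floatValidation_alt (exp : String) : String :=
  let masked := exp.toList.map (fun c => if c == '.' || PySem.Chars.isdigit c then c else ' ')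
  String.mk (PySem.Chars.join []
    (((PySem.Chars.split₀ masked).filter (fun t => PySem.Chars.isIn ['.'] t)).map valFloatB))

-- ===== PRECONDITION & SPEC =====
def Spec_floatValidation (exp : String) (out : String) : Prop := out = floatValidation_alt exp
instance (exp : String) (out : String) : Decidable (Spec_floatValidation exp out) := by unfold Spec_floatValidation; infer_instance

-- ===== CLAIM (what is proved, stated in full; the proofs are below) =====
def Claim_equal_floatValidation : Prop := ∀ (exp : String), Dom_floatValidation exp → Spec_floatValidation exp (floatValidation exp)

-- ===== LEMMAS AND PROOFS =====

def pvIsNum (c : Char) : Bool := c == '.' || PySem.Chars.isdigit c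

-- A's "flush the current run" value
def pvFlush (num : List Char) : List Char :=
  if PySem.Chars.count num ['.'] > 0 then valFloatA num else []

-- A's loop, recast as a recursion on the remaining characters
def pvProcA (num : List Char) : List Char → List Char
  | [] => pvFlush num
  | c :: t => if pvIsNum c then pvProcA (num ++ [c]) t else pvFlush num ++ pvProcA [] t

-- B's whole computation, on a character list
def pvProcB (s : List Char) : List Char :=
  PySem.Chars.join []
    (((PySem.Chars.split₀ (s.map (fun c => if c == '.' || PySem.Chars.isdigit c then c else ' '))).filter
        (fun t => PySem.Chars.isIn ['.'] t)).map valFloatB)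

lemma pv_count_go_single (c : Char) : ∀ (fuel : Nat) (l : List Char) (acc : Nat), l.length ≤ fuel →
    PySem.Chars.count.go [c] fuel l acc = acc + l.count c := by
  intro fuel
  induction fuel with
  | zero =>
    intro l acc h
    have : l = [] := List.length_eq_zero_iff.mp (Nat.le_zero.mp h)
    subst this; simp [PySem.Chars.count.go]
  | succ n ih =>
    intro l acc h
    cases l with
    | nil => simp [PySem.Chars.count.go]
    | cons x t =>
      simp only [PySem.Chars.count.go]
      by_cases hx : c = x
      · subst hx
        simp [List.isPrefixOf, ih t (acc+1) (by simpa using Nat.lt_succ_iff.mp (by simpa using h))]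
        omega
      · simp [List.isPrefixOf, hx, ih t acc (by simpa using Nat.lt_succ_iff.mp (by simpa using h)), Ne.symm hx]

lemma pv_count_singleton (s : List Char) (c : Char) :
    PySem.Chars.count s [c] = s.count c := by
  simp [PySem.Chars.count, pv_count_go_single c s.length s 0 le_rfl]

lemma pv_isnum_not_space (c : Char) (h : pvIsNum c = true) : PySem.Chars.isspace c = false := by
  simp [pvIsNum, PySem.Chars.isdigit] at h
  rcases h with h | ⟨h1, h2⟩
  · subst h; decide
  · simp [PySem.Chars.isspace]
    have n1 : (48 : Nat) ≤ c.toNat := h1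
    have n2 : c.toNat ≤ 57 := h2
    omega

lemma pv_go_acc (s : List Char) : ∀ (cur : List Char) (acc : List (List Char)),
    PySem.Chars.split₀.go s cur acc = acc.reverse ++ PySem.Chars.split₀.go s cur [] := by
  induction s with
  | nil => intro cur acc; simp [PySem.Chars.split₀.go]; split <;> simp
  | cons c rest ih =>
    intro cur acc
    simp only [PySem.Chars.split₀.go]
    split
    · split
      · exact ih [] acc
      · rw [ih [] (cur.reverse :: acc), ih [] [cur.reverse]]
        simp
    · exact ih (c :: cur) acc

lemma pv_go_nonspace (num : List Char) (h : ∀ c ∈ num, PySem.Chars.isspace c = false) :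
    ∀ (l cur : List Char) (acc : List (List Char)),
    PySem.Chars.split₀.go (num ++ l) cur acc = PySem.Chars.split₀.go l (num.reverse ++ cur) acc := by
  induction num with
  | nil => simp
  | cons c t ih =>
    intro l cur acc
    simp only [List.cons_append, PySem.Chars.split₀.go]
    rw [if_neg (by simp [h c (by simp)])]
    rw [ih (fun x hx => h x (by simp [hx])) l (c :: cur) acc]
    simp

lemma pv_split_nonspace (num : List Char) (h : ∀ c ∈ num, PySem.Chars.isspace c = false) :
    PySem.Chars.split₀ num = if num.isEmpty then [] else [num] := by
  have := pv_go_nonspace num h [] [] []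
  simp only [List.append_nil] at this
  simp only [PySem.Chars.split₀, this, PySem.Chars.split₀.go]
  rcases num with _ | _ <;> simp

lemma pv_split_run (num : List Char) (h : ∀ c ∈ num, PySem.Chars.isspace c = false) (r : List Char) :
    PySem.Chars.split₀ (num ++ ' ' :: r) =
      (if num.isEmpty then [] else [num]) ++ PySem.Chars.split₀ r := by
  simp only [PySem.Chars.split₀, pv_go_nonspace num h (' ' :: r) [] []]
  simp only [PySem.Chars.split₀.go]
  rw [if_pos (by decide)]
  rcases num with _ | ⟨c, t⟩
  · simp
  · rw [if_neg (by simp)]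
    simp only [List.append_nil, List.reverse_reverse]
    rw [pv_go_acc r [] [c :: t]]
    simp

lemma pv_join_nil (l : List (List Char)) : PySem.Chars.join [] l = l.flatten := by
  induction l with
  | nil => rfl
  | cons x t ih =>
    cases t with
    | nil => simp [PySem.Chars.join, List.intercalate]
    | cons y u =>
      simp [PySem.Chars.join, List.intercalate] at ih ⊢
      simpa using ih

lemma pv_isin_dot (s : List Char) : PySem.Chars.isIn ['.'] s = true ↔ '.' ∈ s := by
  rw [PySem.Chars.isIn_iff_infix, List.singleton_infix_iff]

lemma pv_valA_eq_valB (num : List Char) (h : '.' ∈ num) : valFloatA num = valFloatB num := by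
  obtain ⟨i, hi⟩ := Option.isSome_iff_exists.mp ((PySem.List.index?_isSome_iff num '.').mpr h)
  obtain ⟨hilen, hget, hfirst⟩ := PySem.List.getElem_of_index?_eq_some hi
  have hnotbefore : '.' ∉ num.take i := by
    intro hmem
    obtain ⟨j, hj, hjget⟩ := List.mem_iff_getElem.mp hmem
    have hj' : j < i := by simp [List.length_take] at hj; omega
    exact hfirst j (by omega) (by rw [← hjget]; exact (List.getElem_take ..).symm)
  have hcount : num.count '.' = 1 + (num.drop (i+1)).count '.' := by
    conv_lhs => rw [show num = num.take i ++ '.' :: num.drop (i + 1) by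
      conv_lhs => rw [← List.take_append_drop i num]
      rw [← List.getElem_cons_drop hilen, hget]]
    simp [List.count_append, List.count_eq_zero.mpr hnotbefore]
    omega
  simp only [valFloatA, valFloatB, hi, pv_count_singleton]
  by_cases hmulti : '.' ∈ num.drop (i+1)
  · rw [if_pos (by rw [hcount]; exact Nat.lt_add_of_pos_right (List.count_pos_iff.mpr hmulti)),
      if_pos ((pv_isin_dot _).mpr hmulti)]
  · rw [if_neg (by rw [hcount]; simp [List.count_eq_zero.mpr hmulti]),
      if_neg (fun hc => hmulti ((pv_isin_dot _).mp hc))]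
    by_cases h0 : i = 0
    · subst h0; simp
    · have h0' : 0 < i := Nat.pos_of_ne_zero h0
      by_cases h1 : i + 1 < num.length
      · have htake : (num.take i).isEmpty = false := by
          simp [List.take_eq_nil_iff]
          exact ⟨h0, fun hn => by subst hn; simp at hilen⟩
        have hdrop : (num.drop (i+1)).isEmpty = false := by
          simp [List.drop_eq_nil_iff]; omega
        have e1 : num[i-1]?.getD ' ' = num[i-1] := by
          rw [List.getElem?_eq_getElem (by omega)]; rfl
        have e3 : (num.take i).getLast?.getD ' ' = num[i-1] := by
          rw [List.getLast?_eq_getElem?]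
          rw [List.length_take, Nat.min_eq_left (by omega : i ≤ num.length)]
          rw [List.getElem?_take, if_pos (by omega), List.getElem?_eq_getElem (by omega)]
          rfl
        simp [h0', h1, htake, hdrop, e1, e3]
      · have hd : num.drop (i+1) = [] := List.drop_eq_nil_iff.mpr (by omega)
        simp [h1, hd]

lemma pv_mask_num (num : List Char) (h : ∀ c ∈ num, pvIsNum c = true) :
    num.map (fun c => if c == '.' || PySem.Chars.isdigit c then c else ' ') = num := by
  rw [List.map_congr_left (g := id) (fun c hc => by
    have h' := h c hc; unfold pvIsNum at h'
    show (if c == '.' || PySem.Chars.isdigit c then c else ' ') = c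
    rw [if_pos h']), List.map_id]

lemma pv_run_flush (num : List Char) (h : ∀ c ∈ num, pvIsNum c = true) :
    PySem.Chars.join []
      (((if num.isEmpty then ([] : List (List Char)) else [num]).filter
          (fun t => PySem.Chars.isIn ['.'] t)).map valFloatB) = pvFlush num := by
  rw [pv_join_nil]
  rcases num with _ | ⟨c, t⟩
  · simp [pvFlush, pv_count_singleton]
  · rw [if_neg (by simp)]
    by_cases hm : '.' ∈ c :: t
    · rw [List.filter_cons_of_pos ((pv_isin_dot _).mpr hm)]
      simp only [List.filter_nil, List.map_cons, List.map_nil, List.flatten]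
      unfold pvFlush
      rw [if_pos (by rw [pv_count_singleton]; exact List.count_pos_iff.mpr hm)]
      simp [pv_valA_eq_valB _ hm]
    · rw [List.filter_cons_of_neg (by simp only [pv_isin_dot]; exact hm)]
      unfold pvFlush
      rw [if_neg (by rw [pv_count_singleton]; simp [List.count_eq_zero.mpr hm])]
      simp

lemma pv_main (l : List Char) : ∀ (num : List Char), (∀ c ∈ num, pvIsNum c = true) →
    pvProcA num l = pvProcB (num ++ l) := by
  induction l with
  | nil =>
    intro num h
    simp only [pvProcA, pvProcB, List.append_nil, pv_mask_num num h]
    rw [pv_split_nonspace num (fun c hc => pv_isnum_not_space c (h c hc))]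
    exact (pv_run_flush num h).symm
  | cons c t ih =>
    intro num h
    simp only [pvProcA]
    by_cases hc : pvIsNum c = true
    · rw [if_pos hc, ih (num ++ [c]) (fun x hx => by
        rcases List.mem_append.mp hx with h' | h'
        · exact h x h'
        · simp at h'; subst h'; exact hc)]
      simp [pvProcB]
    · rw [if_neg hc]
      rw [ih [] (by simp)]
      simp only [pvProcB, List.map_append, List.map_cons, pv_mask_num num h]
      unfold pvIsNum at hc
      rw [show (if c == '.' || PySem.Chars.isdigit c then c else ' ') = ' ' from if_neg hc]
      rw [pv_split_run num (fun x hx => pv_isnum_not_space x (h x hx))]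
      simp only [List.filter_append, List.map_append, pv_join_nil, List.flatten_append]
      congr 1
      rw [← pv_join_nil]
      exact (pv_run_flush num h).symm

lemma pv_foldA (l : List Char) : ∀ (err num : List Char),
    (let r := l.foldl
      (fun (s : List Char × List Char) c =>
        if c == '.' || PySem.Chars.isdigit c then (s.1, s.2 ++ [c])
        else (if PySem.Chars.count s.2 ['.'] > 0 then s.1 ++ valFloatA s.2 else s.1, ([] : List Char)))
      (err, num)
    if PySem.Chars.count r.2 ['.'] > 0 then r.1 ++ valFloatA r.2 else r.1) = err ++ pvProcA num l := by
  induction l with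
  | nil =>
    intro err num
    simp only [List.foldl_nil, pvProcA]
    unfold pvFlush
    split
    · rfl
    · simp
  | cons c t ih =>
    intro err num
    simp only [List.foldl_cons]
    by_cases hc : pvIsNum c = true
    · have hc' := hc; unfold pvIsNum at hc'
      rw [if_pos hc']
      rw [ih err (num ++ [c])]
      simp only [pvProcA]
      rw [if_pos hc]
    · have hc' := hc; unfold pvIsNum at hc'
      rw [if_neg hc']
      rw [ih _ []]
      simp only [pvProcA]
      rw [if_neg hc]
      unfold pvFlush
      split
      · simp
      · simp

-- ===== VERDICT (by name: the statement is the Claim_ definition above) =====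
theorem floatValidation_spec : Claim_equal_floatValidation := by
  intro exp _
  show floatValidation exp = floatValidation_alt exp
  have h1 := pv_foldA exp.toList [] []
  have h2 := pv_main exp.toList [] (by simp)
  simp only [floatValidation, floatValidation_alt, h1]
  rw [h2]
  rfl
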